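-- pv_equiv track=rewrite | github.com/tomfyfe85/python_java_SQL_fundementals | occupancy_advanced.py | count_current_occupancy
-- ===== SOURCE A (Python) =====
-- def count_current_occupancy(stream) -> int:
--     """
--     Count how many tickets are currently inside the venue.
--
--     Args:
--         stream: Generator yielding scan events
--
--     Returns:
--         int: Number of tickets currently inside
--
--     Expected: 4 tickets inside at the end
--     """
--     current_tickets_inside = set()
--
--     for event in stream:
--         scan_type = event['scan_type']
--         ticket_id = event['ticket_id']
--
--         if scan_type == 'entry':
--             current_tickets_inside.add(ticket_id)
--         else:
--             current_tickets_inside.discard(ticket_id)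
--     return len(current_tickets_inside)
-- ===== SOURCE B (Python) =====
-- def count_current_occupancy(stream) -> int:
--     # Different algorithm: scan the stream BACKWARDS; the first time a ticket
--     # is met (its last event in forward order) decides whether it is inside.
--     events = list(stream)
--     seen = set()
--     inside = 0
--     for event in reversed(events):
--         scan_type = event['scan_type']
--         ticket_id = event['ticket_id']
--         if ticket_id not in seen:
--             seen.add(ticket_id)
--             if scan_type == 'entry':
--                 inside += 1
--     return inside
-- ===== Notes on version B (the rewrite author's own statement) =====
-- stated objective: alternative
-- what changed: Replaces A's forward pass maintaining a live membership set (add on entry, discard otherwise) by a single backward pass that counts each ticket at its first occurrence in reverse (= its last scan) if that scan is an entry, maintaining only a seen-set and a counter.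
import Mathlib
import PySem

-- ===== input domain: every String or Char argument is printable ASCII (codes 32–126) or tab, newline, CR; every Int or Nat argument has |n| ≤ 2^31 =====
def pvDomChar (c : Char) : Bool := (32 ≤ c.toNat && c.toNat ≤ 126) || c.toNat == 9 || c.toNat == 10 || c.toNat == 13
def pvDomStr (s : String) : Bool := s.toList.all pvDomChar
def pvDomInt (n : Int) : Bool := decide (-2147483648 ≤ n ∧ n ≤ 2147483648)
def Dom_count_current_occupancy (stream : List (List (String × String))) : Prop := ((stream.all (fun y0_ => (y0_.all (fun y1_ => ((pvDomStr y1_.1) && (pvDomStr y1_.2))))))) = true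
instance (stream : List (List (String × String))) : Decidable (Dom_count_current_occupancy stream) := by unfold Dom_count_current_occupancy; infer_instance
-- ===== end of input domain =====

-- B replaces A's forward live-membership set by one backward pass counting each
-- ticket at its first occurrence in reverse (= its last scan); same O(n) cost.

-- event['scan_type'] / event['ticket_id'] (first-match dict lookup; inside
-- Pre_ both keys are present, so the "" default is never used)
def pvScanType (ev : List (String × String)) : String :=
  ((PySem.Dict.mk ev).get? "scan_type").getD ""
def pvTicketId (ev : List (String × String)) : String :=
  ((PySem.Dict.mk ev).get? "ticket_id").getD ""

-- ===== PORT A =====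
def count_current_occupancy (stream : List (List (String × String))) : Int :=
  let final : PySem.Set String := stream.foldl (fun s ev =>
    let scan := pvScanType ev
    let tid := pvTicketId ev
    if scan == "entry" then PySem.Set.add s tid else PySem.Set.discard s tid) []
  (final.length : Int)

-- ===== PORT B =====
-- one step of B's backward loop: state = (seen set, inside counter)
def pvBStep (st : PySem.Set String × Int) (ev : List (String × String)) :
    PySem.Set String × Int :=
  let scan := pvScanType ev
  let tid := pvTicketId ev
  if PySem.Set.contains st.1 tid then st
  else (PySem.Set.add st.1 tid, if scan == "entry" then st.2 + 1 else st.2)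

def count_current_occupancy_alt (stream : List (List (String × String))) : Int :=
  (stream.reverse.foldl pvBStep (PySem.Set.empty, 0)).2

-- ===== PRECONDITION & SPEC =====
-- Pre_ excludes exactly the streams on which A raises KeyError: some event
-- missing the 'scan_type' or 'ticket_id' key.
def Pre_count_current_occupancy (stream : List (List (String × String))) : Prop :=
  ∀ ev ∈ stream, ((PySem.Dict.mk ev).get? "scan_type").isSome ∧ ((PySem.Dict.mk ev).get? "ticket_id").isSome
instance (stream : List (List (String × String))) : Decidable (Pre_count_current_occupancy stream) := by unfold Pre_count_current_occupancy; infer_instance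

def pvWitness_count_current_occupancy : (List (List (String × String))) :=
  [[("scan_type", "entry"), ("ticket_id", "t1")], [("scan_type", "exit"), ("ticket_id", "t2")]]

def Spec_count_current_occupancy (stream : List (List (String × String))) (out : Int) : Prop := out = count_current_occupancy_alt stream
instance (stream : List (List (String × String))) (out : Int) : Decidable (Spec_count_current_occupancy stream out) := by unfold Spec_count_current_occupancy; infer_instance

-- ===== CLAIM (what is proved, stated in full; the proofs are below) =====
def Claim_equal_count_current_occupancy : Prop := ∀ (stream : List (List (String × String))), Dom_count_current_occupancy stream → Pre_count_current_occupancy stream → Spec_count_current_occupancy stream (count_current_occupancy stream)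

-- ===== LEMMAS AND PROOFS =====

-- scan_type of the first event of l whose ticket_id is x (so, applied to a
-- reversed stream, the LAST scan of x)
def pvFirst (x : String) : List (List (String × String)) → Option String
  | [] => none
  | ev :: rest => if pvTicketId ev = x then some (pvScanType ev) else pvFirst x rest

lemma pvFirst_append (x : String) (a b : List (List (String × String))) :
    pvFirst x (a ++ b) = (pvFirst x a).or (pvFirst x b) := by
  induction a with
  | nil => simp [pvFirst]
  | cons ev rest ih =>
    by_cases h : pvTicketId ev = x <;> simp [pvFirst, h, ih]

-- A's fold: membership is decided by the last scan of the ticket; nodup kept.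
lemma pvA_inv (l : List (List (String × String))) (s : PySem.Set String)
    (hs : s.Nodup) :
    (l.foldl (fun s ev =>
      let scan := pvScanType ev
      let tid := pvTicketId ev
      if scan == "entry" then PySem.Set.add s tid else PySem.Set.discard s tid) s).Nodup ∧
    ∀ x, x ∈ (l.foldl (fun s ev =>
      let scan := pvScanType ev
      let tid := pvTicketId ev
      if scan == "entry" then PySem.Set.add s tid else PySem.Set.discard s tid) s) ↔
      (pvFirst x l.reverse = some "entry" ∨ (pvFirst x l.reverse = none ∧ x ∈ s)) := by
  induction l generalizing s with
  | nil => simpa [pvFirst] using hs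
  | cons ev rest ih =>
    simp only [List.foldl_cons, List.reverse_cons]
    have hs' : (if pvScanType ev == "entry" then PySem.Set.add s (pvTicketId ev)
        else PySem.Set.discard s (pvTicketId ev)).Nodup := by
      by_cases h : pvScanType ev == "entry" <;>
        simp [h, PySem.Set.nodup_add s (pvTicketId ev) hs, PySem.Set.nodup_discard s (pvTicketId ev) hs]
    obtain ⟨hn, hm⟩ := ih _ hs'
    refine ⟨hn, fun x => ?_⟩
    rw [hm x, pvFirst_append]
    cases hf : pvFirst x rest.reverse with
    | some t => simp [Option.or]
    | none =>
      by_cases hx : pvTicketId ev = x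
      · by_cases hsc : pvScanType ev = "entry" <;>
          simp [Option.or, pvFirst, hx, hsc, PySem.Set.mem_add, PySem.Set.mem_discard]
      · have hx' : x ≠ pvTicketId ev := fun h => hx h.symm
        by_cases hsc : pvScanType ev == "entry" <;>
          simp [Option.or, pvFirst, hx, hx', hsc, PySem.Set.mem_add, PySem.Set.mem_discard]

-- the list of tickets B counts while folding r from state seen
def pvM (r : List (List (String × String))) (seen : PySem.Set String) : List String :=
  match r with
  | [] => []
  | ev :: rest =>
    if PySem.Set.contains seen (pvTicketId ev) then pvM rest seen
    else (if pvScanType ev == "entry" then [pvTicketId ev] else []) ++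
      pvM rest (PySem.Set.add seen (pvTicketId ev))

lemma pvB_fold (r : List (List (String × String))) (seen : PySem.Set String) (cnt : Int) :
    (r.foldl pvBStep (seen, cnt)).2 = cnt + (pvM r seen).length := by
  induction r generalizing seen cnt with
  | nil => simp [pvM]
  | cons ev rest ih =>
    simp only [List.foldl_cons, pvBStep, pvM]
    by_cases h : pvTicketId ev ∈ seen
    · simp [h, ih]
    · by_cases hsc : pvScanType ev == "entry" <;> simp [h, hsc, ih] <;> omega

lemma pvM_mem (r : List (List (String × String))) (seen : PySem.Set String) (x : String) :
    x ∈ pvM r seen ↔ x ∉ seen ∧ pvFirst x r = some "entry" := by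
  induction r generalizing seen with
  | nil => simp [pvM, pvFirst]
  | cons ev rest ih =>
    simp only [pvM, pvFirst]
    by_cases h : pvTicketId ev ∈ seen
    · by_cases hx : pvTicketId ev = x
      · subst hx; simp [h, ih]
      · simp [h, hx, ih]
    · by_cases hx : pvTicketId ev = x
      · subst hx
        by_cases hsc : pvScanType ev == "entry"
        · simp [h, hsc]
          simpa using hsc
        · simp [h, hsc, ih]
          simpa using hsc
      · have hx' : x ≠ pvTicketId ev := fun hh => hx hh.symm
        by_cases hsc : pvScanType ev == "entry" <;>
          simp [h, hsc, ih, hx, hx']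

lemma pvM_nodup (r : List (List (String × String))) (seen : PySem.Set String) :
    (pvM r seen).Nodup := by
  induction r generalizing seen with
  | nil => simp [pvM]
  | cons ev rest ih =>
    simp only [pvM]
    by_cases h : pvTicketId ev ∈ seen
    · simp [h, ih]
    · by_cases hsc : pvScanType ev == "entry" <;> simp [h, hsc, ih]
      rw [pvM_mem]
      simp

-- ===== VERDICT (by name: the statement is the Claim_ definition above) =====
theorem count_current_occupancy_spec : Claim_equal_count_current_occupancy := by
  intro stream _ _
  unfold Spec_count_current_occupancy count_current_occupancy count_current_occupancy_alt
  rw [pvB_fold]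
  obtain ⟨hn, hm⟩ := pvA_inv stream [] (by simp)
  have hmm : ∀ x, x ∈ (stream.foldl (fun s ev =>
      let scan := pvScanType ev
      let tid := pvTicketId ev
      if scan == "entry" then PySem.Set.add s tid else PySem.Set.discard s tid) []) ↔
      x ∈ pvM stream.reverse PySem.Set.empty := by
    intro x
    rw [hm x, pvM_mem]
    simp [PySem.Set.empty]
  have hperm := (List.perm_ext_iff_of_nodup hn (pvM_nodup stream.reverse PySem.Set.empty)).mpr hmm
  have hl := hperm.length_eq
  simp only []
  rw [hl]
  simp
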